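-- pv_equiv track=rewrite | github.com/parthasarathys03/hackerrank-clone | backend/main.py | compare_result_sets
-- ===== SOURCE A (Python) =====
-- def normalize_sql_value(v):
--     """Normalize SQL value for comparison (trim strings)"""
--     if isinstance(v, str):
--         return v.strip()
--     return v
--
-- def compare_result_sets(actual_columns, actual_rows, expected_columns, expected_rows):
--     """Compare SQL result sets with flexible ordering"""
--     # Normalize column names
--     actual_cols_norm = [c.strip().lower() for c in actual_columns]
--     expected_cols_norm = [c.strip().lower() for c in expected_columns]
--
--     if set(actual_cols_norm) != set(expected_cols_norm):
--         return False
--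
--     # Map actual columns to expected order
--     index_map = {name: idx for idx, name in enumerate(actual_cols_norm)}
--     ordered_actual_rows = []
--     for row in actual_rows:
--         ordered_actual_rows.append(
--             [normalize_sql_value(row[index_map[col]]) for col in expected_cols_norm]
--         )
--
--     expected_norm_rows = [
--         [normalize_sql_value(v) for v in row] for row in expected_rows
--     ]
--
--     # Ignore row order: compare sorted lists
--     ordered_actual_rows_sorted = sorted(ordered_actual_rows, key=lambda x: str(x))
--     expected_norm_rows_sorted = sorted(expected_norm_rows, key=lambda x: str(x))
--
--     return ordered_actual_rows_sorted == expected_norm_rows_sorted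
-- ===== SOURCE B (Python) =====
-- def _row_key_direct(row):
--     return tuple(v.strip() if isinstance(v, str) else v for v in row)
--
-- def _row_key_reordered(row, index_map, expected_cols_norm):
--     return tuple(v.strip() if isinstance(v, str) else v
--                  for v in (row[index_map[col]] for col in expected_cols_norm))
--
-- def compare_result_sets(actual_columns, actual_rows, expected_columns, expected_rows):
--     """Compare SQL result sets with flexible ordering (hash-based multiset comparison)."""
--     actual_cols_norm = [c.strip().lower() for c in actual_columns]
--     expected_cols_norm = [c.strip().lower() for c in expected_columns]
--
--     if set(actual_cols_norm) != set(expected_cols_norm):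
--         return False
--
--     index_map = {name: idx for idx, name in enumerate(actual_cols_norm)}
--
--     # Tally the normalized expected rows, then let each actual row consume one tally.
--     counts = {}
--     for row in expected_rows:
--         key = _row_key_direct(row)
--         counts[key] = counts.get(key, 0) + 1
--
--     for row in actual_rows:
--         key = _row_key_reordered(row, index_map, expected_cols_norm)
--         n = counts.get(key, 0)
--         if n == 0:
--             return False
--         counts[key] = n - 1
--
--     return all(n == 0 for n in counts.values())
-- ===== Notes on version B (the rewrite author's own statement) =====
-- stated objective: alternative
-- what changed: Replaces A's sort-both-row-lists-by-str(row)-and-compare pass with a hash-based multiset comparison: the normalized expected rows are tallied into a counting dict and each reordered actual row consumes one tally, with a final all-zero check.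
import Mathlib
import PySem

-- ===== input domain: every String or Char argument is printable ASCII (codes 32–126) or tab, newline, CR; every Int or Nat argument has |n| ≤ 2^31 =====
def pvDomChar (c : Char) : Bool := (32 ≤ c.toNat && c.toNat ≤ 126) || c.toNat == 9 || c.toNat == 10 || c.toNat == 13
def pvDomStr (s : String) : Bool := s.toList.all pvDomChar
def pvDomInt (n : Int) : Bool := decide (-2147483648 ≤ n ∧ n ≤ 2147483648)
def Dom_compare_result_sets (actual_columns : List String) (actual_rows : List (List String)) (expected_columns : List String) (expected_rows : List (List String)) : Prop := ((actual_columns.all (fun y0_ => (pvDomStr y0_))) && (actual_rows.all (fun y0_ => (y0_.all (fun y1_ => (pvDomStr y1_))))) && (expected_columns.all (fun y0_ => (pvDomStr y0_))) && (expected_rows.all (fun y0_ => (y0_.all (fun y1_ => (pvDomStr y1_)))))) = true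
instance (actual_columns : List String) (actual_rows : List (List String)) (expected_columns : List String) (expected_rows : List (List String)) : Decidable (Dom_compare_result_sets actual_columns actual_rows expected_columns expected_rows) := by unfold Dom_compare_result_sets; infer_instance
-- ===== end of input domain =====

-- B replaces A's sort-both-lists-by-str(row)-and-compare pass with a hash-based multiset
-- comparison (tally normalized expected rows in a counting dict, let actual rows consume it);
-- objective: alternative algorithm of the same result.

-- ===== PORT A =====

-- Python repr of one string, as chars: chosen quote, escaped body, closing quote.
-- Exact on Dom strings (printable ASCII plus tab/newline/CR); helper for str(list).
def pyEscChar (q c : Char) : List Char :=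
  if c = '\\' then ['\\', '\\']
  else if c = q then ['\\', q]
  else if c = '\t' then ['\\', 't']
  else if c = '\n' then ['\\', 'n']
  else if c = '\r' then ['\\', 'r']
  else [c]

def pyReprStrChars (s : String) : List Char :=
  let cs := s.toList
  let q : Char := if cs.contains '\'' && !cs.contains '"' then '"' else '\''
  q :: (cs.flatMap (pyEscChar q) ++ [q])

-- ", ".join at the List Char level
def pyJoinCommaSpace : List (List Char) → List Char
  | [] => []
  | [x] => x
  | x :: xs => x ++ ',' :: ' ' :: pyJoinCommaSpace xs

-- str(x) for a Python list of strings (the sort key str(x) of A); exact on Dom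
def pyReprStrList (row : List String) : String :=
  String.ofList ('[' :: pyJoinCommaSpace (row.map pyReprStrChars) ++ [']'])

def normalize_sql_value (v : String) : String := PySem.Str.strip v

def compare_result_sets (actual_columns : List String) (actual_rows : List (List String)) (expected_columns : List String) (expected_rows : List (List String)) : Bool :=
  let actual_cols_norm := actual_columns.map (fun c => PySem.Str.lower (PySem.Str.strip c))
  let expected_cols_norm := expected_columns.map (fun c => PySem.Str.lower (PySem.Str.strip c))
  if !(PySem.Set.equal (PySem.Set.ofList actual_cols_norm) (PySem.Set.ofList expected_cols_norm)) then false
  else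
    let index_map : PySem.Dict String Int :=
      (PySem.List.enumerate actual_cols_norm).foldl (fun d p => d.insert p.2 p.1) PySem.Dict.empty
    -- row[index_map[col]]: out-of-range indexing raises in Python; Pre_ excludes it (default "")
    let ordered_actual_rows := actual_rows.foldl
      (fun acc row => acc ++ [expected_cols_norm.map
        (fun col => normalize_sql_value ((PySem.List.pyGet? row (index_map.getD col 0)).getD ""))]) []
    let expected_norm_rows := expected_rows.map (fun row => row.map (fun v => normalize_sql_value v))
    let ordered_actual_rows_sorted := PySem.List.sorted ordered_actual_rows (fun x => pyReprStrList x) false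
    let expected_norm_rows_sorted := PySem.List.sorted expected_norm_rows (fun x => pyReprStrList x) false
    ordered_actual_rows_sorted == expected_norm_rows_sorted

-- ===== PORT B =====

def pvRowKeyDirect (row : List String) : List String :=
  row.map (fun v => PySem.Str.strip v)

def pvRowKeyReordered (row : List String) (index_map : PySem.Dict String Int) (expected_cols_norm : List String) : List String :=
  expected_cols_norm.map (fun col => PySem.Str.strip ((PySem.List.pyGet? row (index_map.getD col 0)).getD ""))

-- the consuming loop over actual rows (early False on a missing tally)
def pvConsume (expected_cols_norm : List String) (index_map : PySem.Dict String Int) (counts : PySem.Dict (List String) Int) : List (List String) → Bool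
  | [] => counts.values.all (fun n => n == 0)
  | row :: rest =>
      let key := pvRowKeyReordered row index_map expected_cols_norm
      let n := counts.getD key 0
      if n == 0 then false else pvConsume expected_cols_norm index_map (counts.insert key (n - 1)) rest

def compare_result_sets_alt (actual_columns : List String) (actual_rows : List (List String)) (expected_columns : List String) (expected_rows : List (List String)) : Bool :=
  let actual_cols_norm := actual_columns.map (fun c => PySem.Str.lower (PySem.Str.strip c))
  let expected_cols_norm := expected_columns.map (fun c => PySem.Str.lower (PySem.Str.strip c))
  if !(PySem.Set.equal (PySem.Set.ofList actual_cols_norm) (PySem.Set.ofList expected_cols_norm)) then false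
  else
    let index_map : PySem.Dict String Int :=
      (PySem.List.enumerate actual_cols_norm).foldl (fun d p => d.insert p.2 p.1) PySem.Dict.empty
    let counts := expected_rows.foldl
      (fun d row => let key := pvRowKeyDirect row; d.insert key (d.getD key 0 + 1)) PySem.Dict.empty
    pvConsume expected_cols_norm index_map counts actual_rows

-- ===== PRECONDITION & SPEC =====
-- Pre_ excludes exactly the inputs where Python A raises IndexError: the column sets match but
-- some actual row is too short for a used index (the last occurrence of some column name).
def Pre_compare_result_sets (actual_columns : List String) (actual_rows : List (List String)) (expected_columns : List String) (expected_rows : List (List String)) : Prop :=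
  let a_norm := actual_columns.map (fun c => PySem.Str.lower (PySem.Str.strip c))
  let e_norm := expected_columns.map (fun c => PySem.Str.lower (PySem.Str.strip c))
  PySem.Set.equal (PySem.Set.ofList a_norm) (PySem.Set.ofList e_norm) = true →
    ∀ row ∈ actual_rows, ∀ j : Fin a_norm.length,
      a_norm[j] ∉ a_norm.drop (j.1 + 1) → j.1 < row.length
instance (actual_columns : List String) (actual_rows : List (List String)) (expected_columns : List String) (expected_rows : List (List String)) : Decidable (Pre_compare_result_sets actual_columns actual_rows expected_columns expected_rows) := by unfold Pre_compare_result_sets; infer_instance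

def pvWitness_compare_result_sets : List String × List (List String) × List String × List (List String) :=
  (["Id", " name"], [["1", " Bob "], ["2", "Eve"]], ["name", "ID "], [["Bob", "2"], ["1 ", "Bob"]])

def Spec_compare_result_sets (actual_columns : List String) (actual_rows : List (List String)) (expected_columns : List String) (expected_rows : List (List String)) (out : Bool) : Prop := out = compare_result_sets_alt actual_columns actual_rows expected_columns expected_rows
instance (actual_columns : List String) (actual_rows : List (List String)) (expected_columns : List String) (expected_rows : List (List String)) (out : Bool) : Decidable (Spec_compare_result_sets actual_columns actual_rows expected_columns expected_rows out) := by unfold Spec_compare_result_sets; infer_instance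

-- ===== CLAIM (what is proved, stated in full; the proofs are below) =====
def Claim_equal_compare_result_sets : Prop := ∀ (actual_columns : List String) (actual_rows : List (List String)) (expected_columns : List String) (expected_rows : List (List String)), Dom_compare_result_sets actual_columns actual_rows expected_columns expected_rows → Pre_compare_result_sets actual_columns actual_rows expected_columns expected_rows → Spec_compare_result_sets actual_columns actual_rows expected_columns expected_rows (compare_result_sets actual_columns actual_rows expected_columns expected_rows)

-- ===== LEMMAS AND PROOFS =====

-- ---- injectivity of the sort key str(row) ----

def pyUnescChar? (e : Char) : Option Char :=
  if e = '\\' then some '\\'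
  else if e = '\'' then some '\''
  else if e = '"' then some '"'
  else if e = 't' then some '\t'
  else if e = 'n' then some '\n'
  else if e = 'r' then some '\r'
  else none

def pvDecodeBody (q : Char) : List Char → Option (List Char × List Char)
  | [] => none
  | c :: rest =>
    if c = '\\' then
      match rest with
      | [] => none
      | e :: rest' =>
        match pyUnescChar? e with
        | none => none
        | some u => (pvDecodeBody q rest').map (fun p => (u :: p.1, p.2))
    else if c = q then some ([], rest)
    else (pvDecodeBody q rest).map (fun p => (c :: p.1, p.2))

theorem pvDecodeBody_length (q : Char) (cs : List Char) :
    ∀ s t, pvDecodeBody q cs = some (s, t) → t.length < cs.length := by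
  fun_induction pvDecodeBody q cs <;> intro s t h <;> simp_all
  case _ ih =>
    obtain ⟨a, hp, _, rfl⟩ := h
    have := ih _ _ hp; omega
  case _ ih =>
    obtain ⟨a, hp, _, rfl⟩ := h
    have := ih _ _ hp; omega

theorem pvDecodeBody_cons_quote (q : Char) (t : List Char) (hq1 : ¬ q = '\\') :
    pvDecodeBody q (q :: t) = some ([], t) := by
  rw [pvDecodeBody.eq_def]; simp [hq1]

theorem pvDecodeBody_cons_plain (q c : Char) (t : List Char) (h1 : ¬ c = '\\') (h2 : ¬ c = q) :
    pvDecodeBody q (c :: t) = (pvDecodeBody q t).map (fun p => (c :: p.1, p.2)) := by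
  rw [pvDecodeBody.eq_def]; simp [h1, h2]

theorem pvDecodeBody_cons_esc (q u e : Char) (t : List Char) (hu : pyUnescChar? e = some u) :
    pvDecodeBody q ('\\' :: e :: t) = (pvDecodeBody q t).map (fun p => (u :: p.1, p.2)) := by
  rw [pvDecodeBody.eq_def]; simp [hu]

theorem pyEscChar_spec (q : Char) (hq : q = '\'' ∨ q = '"') (c : Char) :
    (pyEscChar q c = [c] ∧ ¬ c = '\\' ∧ ¬ c = q) ∨
    (∃ e, pyEscChar q c = ['\\', e] ∧ pyUnescChar? e = some c) := by
  unfold pyEscChar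
  split_ifs with h1 h2 h3 h4 h5
  · subst h1; exact Or.inr ⟨'\\', rfl, by simp [pyUnescChar?]⟩
  · refine Or.inr ⟨q, rfl, ?_⟩
    rw [h2]
    rcases hq with h | h <;> rw [h] <;> decide
  · subst h3; exact Or.inr ⟨'t', rfl, by simp [pyUnescChar?]⟩
  · subst h4; exact Or.inr ⟨'n', rfl, by simp [pyUnescChar?]⟩
  · subst h5; exact Or.inr ⟨'r', rfl, by simp [pyUnescChar?]⟩
  · exact Or.inl ⟨rfl, h1, h2⟩

theorem pvDecodeBody_round (q : Char) (hq : q = '\'' ∨ q = '"') :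
    ∀ (s t : List Char), pvDecodeBody q (s.flatMap (pyEscChar q) ++ q :: t) = some (s, t) := by
  intro s
  induction s with
  | nil =>
    intro t
    have hq1 : ¬ (q = '\\') := by rcases hq with h | h <;> simp [h]
    simpa using pvDecodeBody_cons_quote q t hq1
  | cons c s' ih =>
    intro t
    rcases pyEscChar_spec q hq c with ⟨h1, h2, h3⟩ | ⟨e, h1, h2⟩
    · rw [List.flatMap_cons, h1, List.singleton_append,
        List.cons_append, pvDecodeBody_cons_plain q c _ h2 h3, ih t]
      rfl
    · rw [List.flatMap_cons, h1]
      have : (['\\', e] ++ List.flatMap (pyEscChar q) s') ++ q :: t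
          = '\\' :: e :: (List.flatMap (pyEscChar q) s' ++ q :: t) := by simp
      rw [this, pvDecodeBody_cons_esc q c e _ h2]
      simp [ih t]

def pvDecodeElems : List Char → Option (List (List Char))
  | [] => some []
  | q :: rest =>
    match h : pvDecodeBody q rest with
    | some (s, []) => some [s]
    | some (s, ',' :: ' ' :: rest') => (pvDecodeElems rest').map (fun l => s :: l)
    | _ => none
  termination_by cs => cs.length
  decreasing_by
    have := pvDecodeBody_length q rest _ _ h
    simp at this ⊢
    omega

theorem pvReprQuote_cases (s : String) :
    (if s.toList.contains '\'' && !s.toList.contains '"' then '"' else '\'') = '\'' ∨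
    (if s.toList.contains '\'' && !s.toList.contains '"' then '"' else '\'') = '"' := by
  split <;> simp

theorem pvDecodeElems_round : ∀ (row : List String),
    pvDecodeElems (pyJoinCommaSpace (row.map pyReprStrChars)) = some (row.map String.toList) := by
  intro row
  induction row with
  | nil => simp [pyJoinCommaSpace, pvDecodeElems]
  | cons s row' ih =>
    cases row' with
    | nil =>
      show pvDecodeElems (pyJoinCommaSpace [pyReprStrChars s]) = _
      have hq := pvReprQuote_cases s
      set q := (if s.toList.contains '\'' && !s.toList.contains '"' then '"' else '\'') with hqdef
      have hrepr : pyReprStrChars s = q :: (s.toList.flatMap (pyEscChar q) ++ [q]) := rfl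
      rw [show pyJoinCommaSpace [pyReprStrChars s] = pyReprStrChars s from rfl, hrepr]
      rw [pvDecodeElems]
      rw [pvDecodeBody_round q hq s.toList []]
      simp
    | cons s2 tl =>
      have hq := pvReprQuote_cases s
      set q := (if s.toList.contains '\'' && !s.toList.contains '"' then '"' else '\'') with hqdef
      have hrepr : pyReprStrChars s = q :: (s.toList.flatMap (pyEscChar q) ++ [q]) := rfl
      have hjoin : pyJoinCommaSpace ((s :: s2 :: tl).map pyReprStrChars)
          = q :: (s.toList.flatMap (pyEscChar q) ++ q :: (',' :: ' ' :: pyJoinCommaSpace ((s2 :: tl).map pyReprStrChars))) := by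
        show pyReprStrChars s ++ ',' :: ' ' :: pyJoinCommaSpace ((s2 :: tl).map pyReprStrChars) = _
        rw [hrepr]; simp
      rw [hjoin, pvDecodeElems]
      rw [pvDecodeBody_round q hq s.toList (',' :: ' ' :: pyJoinCommaSpace ((s2 :: tl).map pyReprStrChars))]
      simp only [ih]
      simp

theorem pyReprStrList_injective : Function.Injective pyReprStrList := by
  intro r1 r2 h
  have h1 : '[' :: pyJoinCommaSpace (r1.map pyReprStrChars) ++ [']']
      = '[' :: pyJoinCommaSpace (r2.map pyReprStrChars) ++ [']'] := by
    have := congrArg String.toList h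
    simpa [pyReprStrList] using this
  have h2 : pyJoinCommaSpace (r1.map pyReprStrChars) = pyJoinCommaSpace (r2.map pyReprStrChars) := by
    have := List.cons_injective.eq_iff.mp h1
    exact List.append_cancel_right this
  have h3 : some (r1.map String.toList) = some (r2.map String.toList) := by
    rw [← pvDecodeElems_round r1, ← pvDecodeElems_round r2, h2]
  have h4 : r1.map String.toList = r2.map String.toList := by exact Option.some_inj.mp h3
  have : Function.Injective String.toList := fun a b hab => String.toList_inj.mp hab
  exact List.map_injective_iff.mpr this h4

-- ---- the sorted-and-compare test decides permutation ----

theorem sorted_beq_iff_perm (X Y : List (List String)) :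
    ((PySem.List.sorted X (fun x => pyReprStrList x) false == PySem.List.sorted Y (fun x => pyReprStrList x) false) = true)
      ↔ X.Perm Y := by
  rw [beq_iff_eq]
  constructor
  · intro h
    have hx := PySem.List.sorted_perm X (fun x => pyReprStrList x) false
    have hy := PySem.List.sorted_perm Y (fun x => pyReprStrList x) false
    exact (hx.symm.trans (h ▸ hy))
  · intro h
    exact PySem.List.sorted_eq_sorted_of_perm X Y _ pyReprStrList_injective h

-- ---- the consuming loop decides permutation ----

theorem pvConsume_iff (ecols : List String) (imap : PySem.Dict String Int) :
    ∀ (rows : List (List String)) (d : PySem.Dict (List String) Int) (M : List (List String)),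
      d.keys.Nodup → (∀ k, d.getD k 0 = (M.count k : Int)) →
      (pvConsume ecols imap d rows = true ↔ (rows.map (fun row => pvRowKeyReordered row imap ecols)).Perm M) := by
  intro rows
  induction rows with
  | nil =>
    intro d M hnd hcount
    simp only [pvConsume, List.map_nil, List.nil_perm]
    rw [PySem.Dict.values_eq_map_keys d hnd 0]
    simp only [List.all_map, List.all_eq_true, Function.comp]
    constructor
    · intro h
      rw [List.eq_nil_iff_forall_not_mem]
      intro k hk
      by_cases hmem : k ∈ d.keys
      · have := h k hmem
        simp only [beq_iff_eq] at this
        rw [hcount k] at this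
        have : M.count k = 0 := by exact_mod_cast this
        rw [List.count_eq_zero] at this
        exact this hk
      · have hc : d.contains k = false := by
          rw [← Bool.not_eq_true, PySem.Dict.contains_iff_mem_keys]; exact hmem
        have := PySem.Dict.getD_of_not_contains d 0 hc
        rw [hcount k] at this
        have : M.count k = 0 := by exact_mod_cast this
        rw [List.count_eq_zero] at this
        exact this hk
    · intro h; subst h
      intro k _
      simp only [beq_iff_eq]
      rw [hcount k]; simp
  | cons row rest ih =>
    intro d M hnd hcount
    simp only [pvConsume, List.map_cons]
    set key := pvRowKeyReordered row imap ecols with hkey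
    have hn := hcount key
    by_cases hz : d.getD key 0 = 0
    · rw [if_pos (by simp [hz])]
      simp only [Bool.false_eq_true, false_iff]
      intro hperm
      have hmem : key ∈ M := hperm.mem_iff.mp (by simp)
      rw [hz] at hn
      have : M.count key = 0 := by exact_mod_cast hn.symm
      rw [List.count_eq_zero] at this
      exact this hmem
    · rw [if_neg (by simpa using hz)]
      have hpos : 1 ≤ M.count key := by
        by_contra hlt
        apply hz
        have : M.count key = 0 := by omega
        rw [hn, this]; rfl
      have hmem : key ∈ M := by
        rw [← List.count_pos_iff]; omega
      have hcount' : ∀ k, (d.insert key (d.getD key 0 - 1)).getD k 0 = ((M.erase key).count k : Int) := by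
        intro k
        rw [PySem.Dict.getD_insert]
        by_cases hk : k = key
        · subst hk
          rw [if_pos rfl, hcount key, List.count_erase_self]
          omega
        · rw [if_neg hk, hcount k, List.count_erase_of_ne hk]
      rw [ih (d.insert key (d.getD key 0 - 1)) (M.erase key) (PySem.Dict.nodup_keys_insert d _ _ hnd) hcount']
      rw [List.cons_perm_iff_perm_erase]
      constructor
      · intro h; exact ⟨hmem, h⟩
      · intro h; exact h.2

-- ---- bridging the two ports ----

theorem counts_eq_counter (expected_rows : List (List String)) :
    expected_rows.foldl (fun d row => let key := pvRowKeyDirect row; d.insert key (d.getD key 0 + 1)) PySem.Dict.empty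
      = PySem.Dict.counter (expected_rows.map pvRowKeyDirect) := by
  rw [← PySem.Dict.foldl_insert_getD_add_one_eq_counter, List.foldl_map]

theorem ordered_rows_eq_map (ecols : List String) (imap : PySem.Dict String Int) (rows : List (List String)) :
    rows.foldl (fun acc row => acc ++ [ecols.map
        (fun col => normalize_sql_value ((PySem.List.pyGet? row (imap.getD col 0)).getD ""))]) []
      = rows.map (fun row => pvRowKeyReordered row imap ecols) := by
  rw [PySem.List.foldl_append_singleton_eq_map]
  simp [pvRowKeyReordered, normalize_sql_value]

-- ===== VERDICT (by name: the statement is the Claim_ definition above) =====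
theorem compare_result_sets_spec : Claim_equal_compare_result_sets := by
  intro actual_columns actual_rows expected_columns expected_rows _ _
  unfold Spec_compare_result_sets compare_result_sets compare_result_sets_alt
  set acn := actual_columns.map (fun c => PySem.Str.lower (PySem.Str.strip c)) with hacn
  set ecn := expected_columns.map (fun c => PySem.Str.lower (PySem.Str.strip c)) with hecn
  by_cases hg : PySem.Set.equal (PySem.Set.ofList acn) (PySem.Set.ofList ecn) = true
  · rw [if_neg (by simp [hg]), if_neg (by simp [hg])]
    simp only []
    set imap := (PySem.List.enumerate acn).foldl (fun d p => d.insert p.2 p.1) PySem.Dict.empty with himap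
    rw [ordered_rows_eq_map ecn imap actual_rows, counts_eq_counter]
    set X := actual_rows.map (fun row => pvRowKeyReordered row imap ecn) with hX
    set Y := expected_rows.map (fun row => row.map (fun v => normalize_sql_value v)) with hY
    have hY' : expected_rows.map pvRowKeyDirect = Y := by
      simp [hY, pvRowKeyDirect, normalize_sql_value]
    rw [hY']
    have hA := sorted_beq_iff_perm X Y
    have hB := pvConsume_iff ecn imap actual_rows (PySem.Dict.counter Y) Y
      (PySem.Dict.nodup_keys_counter Y) (fun k => PySem.Dict.getD_counter Y k)
    rw [← hX] at hB
    rw [Bool.eq_iff_iff, hA, hB]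
  · rw [if_pos (by simp [hg]), if_pos (by simp [hg])]
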